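-- pv_equiv track=rewrite | github.com/Demindiro/1010-6573 | Position.py | are_chained
-- ===== SOURCE A (Python) =====
-- def get_adjacent_positions(position, dimension=None):
--     """
--         Return a mutable set of all positions immediately adjacent to the
--         given position and within the boundaries of a board with the given
--         dimension.
--         - Adjacent positions are either at a horizontal distance or at a vertical
--           distance of 1 from the given position.
--         - If the given dimension is None, no boundaries apply.
--         ASSUMPTIONS
--         - The given position is a proper position for any board with the
--           given dimension, or simply a proper position if no dimension is supplied.
--     """
--     x, y = position
--
--     if dimension is None:
--         return {(x-1,y), (x+1,y), (x,y-1), (x,y+1)}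
--
--     s = set()
--     if x > 1:
--         s.add((x - 1, y))
--     if x < dimension:
--         s.add((x + 1, y))
--     if y > 1:
--         s.add((x, y - 1))
--     if y < dimension:
--         s.add((x, y + 1))
--     return s
--
-- def are_chained(positions):
--     """
--         Check whether the given collection of positions make up a chain.
--         - True if and only if each position in the given collection of positions
--           can be reached from each other position in that collection.
--           A position P1 can be reached from another position P2 if
--             (1) P1 and P2 are adjacent to each other, or
--             (2) there exists at least one position P3 in the given collection
--                 of positions that can be reached from both P1 and P2.
--        ASSUMPTIONS
--        - Each position in the collection of positions is a proper position.
--        NOTE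
--        - This version of the function must be worked out in an iterative way.
--          The body may use while statements and/or for statements.
--     """
--
--     positions = set(positions)
--     chained_positions = set()
--     for pos in positions:
--         tocheck_positions = {pos}
--         break
--     else:
--         return True
--
--     while True:
--         tochecknext_positions = set()
--         for pos in tocheck_positions:
--             for adjpos in get_adjacent_positions(pos):
--                 if adjpos not in chained_positions and adjpos in positions:
--                     tochecknext_positions.add(adjpos)
--         chained_positions |= tocheck_positions
--         if len(tochecknext_positions) == 0:
--             break
--         tocheck_positions  = tochecknext_positions
--
--     return len(positions - chained_positions) == 0
-- ===== SOURCE B (Python) =====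
-- def are_chained(positions):
--     # quick-find union of grid-adjacent positions: label map merged per present edge,
--     # chained iff at most one distinct label remains
--     comp = {p: p for p in positions}
--     for p in comp:
--         x, y = p
--         for nb in ((x - 1, y), (x + 1, y), (x, y - 1), (x, y + 1)):
--             if nb in comp:
--                 a, b = comp[p], comp[nb]
--                 if a != b:
--                     for k in comp:
--                         if comp[k] == a:
--                             comp[k] = b
--     return len(set(comp.values())) <= 1
-- ===== Notes on version B (the rewrite author's own statement) =====
-- stated objective: alternative
-- what changed: BFS flood-fill from one start position with frontier sets is replaced by a quick-find union-find: a label map over the positions is merged along every present grid edge and the result is True iff at most one distinct label remains.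
import Mathlib
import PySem

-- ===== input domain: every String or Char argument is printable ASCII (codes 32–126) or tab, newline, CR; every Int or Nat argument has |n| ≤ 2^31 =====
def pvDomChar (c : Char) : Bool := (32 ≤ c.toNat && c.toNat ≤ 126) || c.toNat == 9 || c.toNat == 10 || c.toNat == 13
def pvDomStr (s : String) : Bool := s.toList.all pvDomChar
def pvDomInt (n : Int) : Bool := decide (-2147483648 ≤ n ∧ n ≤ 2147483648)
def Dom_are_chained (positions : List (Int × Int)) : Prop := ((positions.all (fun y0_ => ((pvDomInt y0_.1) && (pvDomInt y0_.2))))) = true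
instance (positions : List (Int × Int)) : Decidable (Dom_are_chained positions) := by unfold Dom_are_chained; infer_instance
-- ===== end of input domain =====

-- B replaces A's BFS flood fill by a quick-find union-find over the grid edges (alternative
-- algorithm, similar cost).  A iterates over Python sets only where the Boolean result is
-- order-independent, so the ports below fix an order without changing the value.

-- ===== PORT A =====

-- helper of A; A only calls it with dimension=None, but it is ported in full
def get_adjacent_positions (position : Int × Int) (dimension : Option Int) : PySem.Set (Int × Int) :=
  match dimension with
  | none => PySem.Set.ofList
      [(position.1 - 1, position.2), (position.1 + 1, position.2),
       (position.1, position.2 - 1), (position.1, position.2 + 1)]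
  | some dim =>
    let s0 : PySem.Set (Int × Int) := PySem.Set.empty
    let s1 := if position.1 > 1 then s0.add (position.1 - 1, position.2) else s0
    let s2 := if position.1 < dim then s1.add (position.1 + 1, position.2) else s1
    let s3 := if position.2 > 1 then s2.add (position.1, position.2 - 1) else s2
    if position.2 < dim then s3.add (position.1, position.2 + 1) else s3

-- body of A's inner `for pos in tocheck_positions: for adjpos in …` building tochecknext_positions
def bfs_tochecknext (positions chained tocheck : PySem.Set (Int × Int)) : PySem.Set (Int × Int) :=
  tocheck.foldl
    (fun acc pos =>
      (get_adjacent_positions pos none).foldl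
        (fun acc2 adjpos =>
          if !(chained.contains adjpos) && positions.contains adjpos then acc2.add adjpos else acc2)
        acc)
    PySem.Set.empty

-- A's `while True` loop; the fuel 2*|positions|+2 is proven sufficient below
-- (lemma bfs_loop_char: the 0-fuel branch is never reached), so this is Python's loop exactly
def bfs_loop (positions chained tocheck : PySem.Set (Int × Int)) (fuel : Nat) :
    PySem.Set (Int × Int) :=
  match fuel with
  | 0 => chained.union tocheck
  | fuel + 1 =>
    let tochecknext := bfs_tochecknext positions chained tocheck
    let chained2 := chained.union tocheck
    if tochecknext.len == 0 then chained2 else bfs_loop positions chained2 tochecknext fuel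

-- `for pos in positions: tocheck={pos}; break / else: return True` picks an arbitrary
-- element of the Python set (hash order); the result is start-independent, ported as head
def are_chained (positions : List (Int × Int)) : Bool :=
  let pset := PySem.Set.ofList positions
  match pset with
  | [] => true
  | pos :: _ =>
    let chained := bfs_loop pset PySem.Set.empty (PySem.Set.ofList [pos]) (2 * pset.length + 2)
    PySem.Set.len (pset.diff chained) == 0

-- ===== PORT B =====

def nbrs (p : Int × Int) : List (Int × Int) :=
  [(p.1 - 1, p.2), (p.1 + 1, p.2), (p.1, p.2 - 1), (p.1, p.2 + 1)]

-- `for k in comp: if comp[k] == a: comp[k] = b` (comp[k] always present: get? = some exactly)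
def relabel (comp : PySem.Dict (Int × Int) (Int × Int)) (a b : Int × Int) :
    PySem.Dict (Int × Int) (Int × Int) :=
  comp.keys.foldl (fun d k => if d.get? k = some a then d.insert k b else d) comp

-- `if nb in comp: a, b = comp[p], comp[nb]; if a != b: relabel`; p is always a key
def unionAt (comp : PySem.Dict (Int × Int) (Int × Int)) (p nb : Int × Int) :
    PySem.Dict (Int × Int) (Int × Int) :=
  match comp.get? nb with
  | none => comp
  | some b =>
    match comp.get? p with
    | none => comp
    | some a => if a ≠ b then relabel comp a b else comp

def are_chained_alt (positions : List (Int × Int)) : Bool :=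
  let comp0 := positions.foldl (fun d p => d.insert p p) PySem.Dict.empty
  let comp := comp0.keys.foldl (fun d p => (nbrs p).foldl (fun d nb => unionAt d p nb) d) comp0
  decide (PySem.Set.len (PySem.Set.ofList comp.values) ≤ 1)

-- ===== PRECONDITION & SPEC =====
def Spec_are_chained (positions : List (Int × Int)) (out : Bool) : Prop := out = are_chained_alt positions
instance (positions : List (Int × Int)) (out : Bool) : Decidable (Spec_are_chained positions out) := by unfold Spec_are_chained; infer_instance

-- ===== CLAIM (what is proved, stated in full; the proofs are below) =====
def Claim_equal_are_chained : Prop := ∀ (positions : List (Int × Int)), Dom_are_chained positions → Spec_are_chained positions (are_chained positions)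

-- ===== LEMMAS AND PROOFS =====

-- the grid-adjacency graph restricted to the distinct positions L, and its reachability
def EdgeRel (L : List (Int × Int)) (p q : Int × Int) : Prop := p ∈ L ∧ q ∈ L ∧ q ∈ nbrs p

def Reach (L : List (Int × Int)) : (Int × Int) → (Int × Int) → Prop :=
  Relation.ReflTransGen (EdgeRel L)

lemma nbrs_symm (p q : Int × Int) : q ∈ nbrs p ↔ p ∈ nbrs q := by
  simp only [nbrs, List.mem_cons, List.not_mem_nil, or_false, Prod.ext_iff]
  obtain ⟨a, b⟩ := p; obtain ⟨c, d⟩ := q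
  simp only []
  constructor <;> (rintro (⟨h1, h2⟩ | ⟨h1, h2⟩ | ⟨h1, h2⟩ | ⟨h1, h2⟩) <;> omega)

lemma edgeRel_symm (L : List (Int × Int)) : Symmetric (EdgeRel L) := by
  rintro p q ⟨hp, hq, hn⟩
  exact ⟨hq, hp, (nbrs_symm q p).mpr hn⟩

lemma reach_symm (L : List (Int × Int)) {p q : Int × Int} (h : Reach L p q) : Reach L q p :=
  Relation.ReflTransGen.symmetric (edgeRel_symm L) h

-- ---------- A side: BFS characterization ----------

lemma mem_get_adjacent_none (p x : Int × Int) :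
    x ∈ get_adjacent_positions p none ↔ x ∈ nbrs p := by
  simp [get_adjacent_positions, nbrs, PySem.Set.mem_ofList]

lemma mem_foldl_add_if (l : List (Int × Int)) (c : (Int × Int) → Bool) :
    ∀ (s : PySem.Set (Int × Int)) (x : Int × Int),
      x ∈ l.foldl (fun s y => if c y then s.add y else s) s ↔ x ∈ s ∨ (x ∈ l ∧ c x) := by
  intro s x
  induction l generalizing s with
  | nil => simp
  | cons y l ih =>
    simp only [List.foldl_cons]
    rw [ih]
    by_cases hc : c y = true
    · rw [if_pos hc]
      constructor
      · rintro (h | h)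
        · rcases (PySem.Set.mem_add s y x).mp h with h' | rfl
          · exact Or.inl h'
          · exact Or.inr ⟨List.mem_cons_self, hc⟩
        · exact Or.inr ⟨List.mem_cons_of_mem _ h.1, h.2⟩
      · rintro (h | ⟨hm, hcx⟩)
        · exact Or.inl ((PySem.Set.mem_add s y x).mpr (Or.inl h))
        · rcases List.mem_cons.mp hm with rfl | hm'
          · exact Or.inl ((PySem.Set.mem_add s x x).mpr (Or.inr rfl))
          · exact Or.inr ⟨hm', hcx⟩
    · rw [if_neg hc]
      constructor
      · rintro (h | h)
        · exact Or.inl h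
        · exact Or.inr ⟨List.mem_cons_of_mem _ h.1, h.2⟩
      · rintro (h | ⟨hm, hcx⟩)
        · exact Or.inl h
        · rcases List.mem_cons.mp hm with rfl | hm'
          · exact absurd hcx hc
          · exact Or.inr ⟨hm', hcx⟩

lemma mem_tochecknext (P C T : PySem.Set (Int × Int)) (x : Int × Int) :
    x ∈ bfs_tochecknext P C T ↔ x ∉ C ∧ x ∈ P ∧ ∃ t ∈ T, x ∈ nbrs t := by
  have hcond : ∀ z : Int × Int,
      (!(C.contains z) && P.contains z) = true ↔ z ∉ C ∧ z ∈ P := by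
    intro z
    rw [Bool.and_eq_true, Bool.not_eq_true']
    constructor
    · rintro ⟨h1, h2⟩
      refine ⟨fun hz => ?_, (PySem.Set.contains_iff P z).mp h2⟩
      rw [(PySem.Set.contains_iff C z).mpr hz] at h1; cases h1
    · rintro ⟨h1, h2⟩
      refine ⟨?_, (PySem.Set.contains_iff P z).mpr h2⟩
      cases hc : C.contains z
      · rfl
      · exact absurd ((PySem.Set.contains_iff C z).mp hc) h1
  unfold bfs_tochecknext
  have hgen : ∀ (ts : List (Int × Int)) (acc : PySem.Set (Int × Int)),
      x ∈ ts.foldl (fun acc pos => (get_adjacent_positions pos none).foldl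
        (fun acc2 adjpos => if !(C.contains adjpos) && P.contains adjpos
          then acc2.add adjpos else acc2) acc) acc
        ↔ x ∈ acc ∨ ∃ t ∈ ts, x ∈ nbrs t
            ∧ (!(C.contains x) && P.contains x) = true := by
    intro ts
    induction ts with
    | nil => intro acc; simp
    | cons t ts ih =>
      intro acc
      simp only [List.foldl_cons]
      rw [ih, mem_foldl_add_if]
      constructor
      · rintro ((h | ⟨hm, hc⟩) | ⟨u, hu, hxu, hc⟩)
        · exact Or.inl h
        · exact Or.inr ⟨t, List.mem_cons_self, (mem_get_adjacent_none t x).mp hm, hc⟩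
        · exact Or.inr ⟨u, List.mem_cons_of_mem _ hu, hxu, hc⟩
      · rintro (h | ⟨u, hu, hxu, hc⟩)
        · exact Or.inl (Or.inl h)
        · rcases List.mem_cons.mp hu with rfl | hu'
          · exact Or.inl (Or.inr ⟨(mem_get_adjacent_none u x).mpr hxu, hc⟩)
          · exact Or.inr ⟨u, hu', hxu, hc⟩
  rw [hgen]
  constructor
  · rintro (h | ⟨t, ht, hxt, hc⟩)
    · simp [PySem.Set.empty] at h
    · rcases (hcond x).mp hc with ⟨h1, h2⟩
      exact ⟨h1, h2, t, ht, hxt⟩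
  · rintro ⟨h1, h2, t, ht, hxt⟩
    exact Or.inr ⟨t, ht, hxt, (hcond x).mpr ⟨h1, h2⟩⟩

-- a set containing the start and closed under present-edge adjacency contains all reachable
lemma reach_mem_of_closed (L : List (Int × Int)) (s0 : Int × Int) (S : PySem.Set (Int × Int))
    (hs0 : s0 ∈ S) (hcl : ∀ c ∈ S, ∀ y, y ∈ nbrs c → y ∈ L → y ∈ S) :
    ∀ x, Reach L s0 x → x ∈ S := by
  intro x h
  induction h with
  | refl => exact hs0
  | tail _ e ih => exact hcl _ ih _ e.2.2 e.2.1

def bfsMu (L C T : List (Int × Int)) : Nat :=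
  2 * (L.toFinset \ C.toFinset).card + (if T.toFinset ⊆ C.toFinset then 1 else 0)

lemma bfs_loop_char (L : List (Int × Int)) (s0 : Int × Int) (_hs0L : s0 ∈ L) :
    ∀ (fuel : Nat) (C T : PySem.Set (Int × Int)),
      (∀ x ∈ C, x ∈ L) → (∀ x ∈ T, x ∈ L) →
      (∀ x ∈ C, Reach L s0 x) → (∀ x ∈ T, Reach L s0 x) →
      (∀ c ∈ C, ∀ y, y ∈ nbrs c → y ∈ L → (y ∈ C ∨ y ∈ T)) →
      (s0 ∈ C ∨ s0 ∈ T) →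
      bfsMu L C T ≤ fuel →
      ∀ x, x ∈ bfs_loop L C T fuel ↔ (x ∈ L ∧ Reach L s0 x) := by
  intro fuel
  induction fuel with
  | zero =>
    intro C T hCL hTL hCs hTs hclosed hs0 hmu x
    exfalso
    unfold bfsMu at hmu
    by_cases hTC : T.toFinset ⊆ C.toFinset
    · rw [if_pos hTC] at hmu; omega
    · rw [if_neg hTC] at hmu
      have hcard : (L.toFinset \ C.toFinset).card = 0 := by omega
      rw [Finset.card_eq_zero] at hcard
      apply hTC
      intro t ht
      have htL : t ∈ L.toFinset := List.mem_toFinset.mpr (hTL t (List.mem_toFinset.mp ht))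
      by_contra htC
      have hmem : t ∈ L.toFinset \ C.toFinset := Finset.mem_sdiff.mpr ⟨htL, htC⟩
      rw [hcard] at hmem
      exact Finset.notMem_empty t hmem
  | succ fuel ih =>
    intro C T hCL hTL hCs hTs hclosed hs0 hmu x
    have hgoal : bfs_loop L C T (fuel + 1)
        = if (PySem.Set.len (bfs_tochecknext L C T) == 0)
            then C.union T else bfs_loop L (C.union T) (bfs_tochecknext L C T) fuel := rfl
    rw [hgoal]
    set T' := bfs_tochecknext L C T with hT'
    have hcase : (PySem.Set.len T' == 0) = true ↔ T' = [] := by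
      have hlen : PySem.Set.len T' = (T'.length : Int) := rfl
      rw [beq_iff_eq, hlen]
      constructor
      · intro h
        exact List.length_eq_zero_iff.mp (by exact_mod_cast h)
      · intro h; rw [h]; rfl
    by_cases hemp : T' = []
    · rw [if_pos (hcase.mpr hemp)]
      constructor
      · intro h
        rcases (PySem.Set.mem_union C T x).mp h with h | h
        · exact ⟨hCL x h, hCs x h⟩
        · exact ⟨hTL x h, hTs x h⟩
      · rintro ⟨hxL, hr⟩
        refine reach_mem_of_closed L s0 (C.union T) ?_ ?_ x hr
        · exact (PySem.Set.mem_union C T s0).mpr hs0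
        · intro c hc y hyn hyL
          rcases (PySem.Set.mem_union C T c).mp hc with hcC | hcT
          · exact (PySem.Set.mem_union C T y).mpr (hclosed c hcC y hyn hyL)
          · by_cases hyC : y ∈ C
            · exact (PySem.Set.mem_union C T y).mpr (Or.inl hyC)
            · exfalso
              have hyT' : y ∈ T' := (mem_tochecknext L C T y).mpr ⟨hyC, hyL, c, hcT, hyn⟩
              rw [hemp] at hyT'
              cases hyT'
    · have hne : ¬ ((PySem.Set.len T' == 0) = true) := fun h => hemp (hcase.mp h)
      rw [if_neg hne]
      refine ih (C.union T) T' ?_ ?_ ?_ ?_ ?_ ?_ ?_ x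
      · intro z hz
        rcases (PySem.Set.mem_union C T z).mp hz with h | h
        · exact hCL z h
        · exact hTL z h
      · intro z hz
        exact ((mem_tochecknext L C T z).mp hz).2.1
      · intro z hz
        rcases (PySem.Set.mem_union C T z).mp hz with h | h
        · exact hCs z h
        · exact hTs z h
      · intro z hz
        obtain ⟨hzC, hzL, t, htT, hzn⟩ := (mem_tochecknext L C T z).mp hz
        exact Relation.ReflTransGen.tail (hTs t htT) ⟨hTL t htT, hzL, hzn⟩
      · intro c hc y hyn hyL
        rcases (PySem.Set.mem_union C T c).mp hc with hcC | hcT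
        · rcases hclosed c hcC y hyn hyL with h | h
          · exact Or.inl ((PySem.Set.mem_union C T y).mpr (Or.inl h))
          · exact Or.inl ((PySem.Set.mem_union C T y).mpr (Or.inr h))
        · by_cases hyC : y ∈ C
          · exact Or.inl ((PySem.Set.mem_union C T y).mpr (Or.inl hyC))
          · exact Or.inr ((mem_tochecknext L C T y).mpr ⟨hyC, hyL, c, hcT, hyn⟩)
      · rcases hs0 with h | h
        · exact Or.inl ((PySem.Set.mem_union C T s0).mpr (Or.inl h))
        · exact Or.inl ((PySem.Set.mem_union C T s0).mpr (Or.inr h))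
      · -- measure decrease
        have hunion : (C.union T).toFinset = C.toFinset ∪ T.toFinset := by
          ext a; simp [List.mem_toFinset, PySem.Set.mem_union]
        obtain ⟨w, hwT'⟩ := List.exists_mem_of_ne_nil T' hemp
        obtain ⟨hwC, hwL, -⟩ := (mem_tochecknext L C T w).mp hwT'
        unfold bfsMu at hmu ⊢
        rw [hunion]
        by_cases hTC : T.toFinset ⊆ C.toFinset
        · rw [if_pos hTC] at hmu
          have h1 : C.toFinset ∪ T.toFinset = C.toFinset := Finset.union_eq_left.mpr hTC
          rw [h1]
          have h2 : ¬ T'.toFinset ⊆ C.toFinset := fun hsub =>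
            hwC (List.mem_toFinset.mp (hsub (List.mem_toFinset.mpr hwT')))
          rw [if_neg h2]
          omega
        · rw [if_neg hTC] at hmu
          obtain ⟨t, htT, htC⟩ := Finset.not_subset.mp hTC
          have htL : t ∈ L.toFinset := List.mem_toFinset.mpr (hTL t (List.mem_toFinset.mp htT))
          have hsub : L.toFinset \ (C.toFinset ∪ T.toFinset) ⊆ L.toFinset \ C.toFinset :=
            Finset.sdiff_subset_sdiff (Finset.Subset.refl _) Finset.subset_union_left
          have hmemdiff : t ∈ L.toFinset \ C.toFinset := Finset.mem_sdiff.mpr ⟨htL, htC⟩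
          have hnmem : t ∉ L.toFinset \ (C.toFinset ∪ T.toFinset) := fun hmem =>
            (Finset.mem_sdiff.mp hmem).2 (Finset.mem_union_right _ htT)
          have hlt : (L.toFinset \ (C.toFinset ∪ T.toFinset)).card
              < (L.toFinset \ C.toFinset).card :=
            Finset.card_lt_card ((Finset.ssubset_iff_of_subset hsub).mpr ⟨t, hmemdiff, hnmem⟩)
          split_ifs <;> omega

lemma pairwise_iff_from_base (L : List (Int × Int)) (s0 : Int × Int) (hs0 : s0 ∈ L) :
    (∀ x ∈ L, Reach L s0 x) ↔ (∀ p ∈ L, ∀ q ∈ L, Reach L p q) := by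
  constructor
  · intro h p hp q hq
    exact (reach_symm L (h p hp)).trans (h q hq)
  · intro h x hx
    exact h s0 hs0 x hx

set_option maxHeartbeats 1000000 in
lemma are_chained_true_iff (positions : List (Int × Int)) :
    are_chained positions = true ↔
      ∀ p ∈ PySem.Set.ofList positions, ∀ q ∈ PySem.Set.ofList positions,
        Reach (PySem.Set.ofList positions) p q := by
  show (match PySem.Set.ofList positions with
      | [] => true
      | pos :: _ => (PySem.Set.len ((PySem.Set.ofList positions).diff
          (bfs_loop (PySem.Set.ofList positions) PySem.Set.empty (PySem.Set.ofList [pos])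
            (2 * (PySem.Set.ofList positions).length + 2))) == 0)) = true ↔ _
  rcases h : PySem.Set.ofList positions with - | ⟨s0, rest⟩
  · simp
  · suffices hs : (PySem.Set.len (PySem.Set.diff (s0 :: rest)
        (bfs_loop (s0 :: rest) PySem.Set.empty (PySem.Set.ofList [s0])
          (2 * (s0 :: rest).length + 2))) == 0) = true
      ↔ ∀ p ∈ s0 :: rest, ∀ q ∈ s0 :: rest, Reach (s0 :: rest) p q by exact hs
    have hs0L : s0 ∈ s0 :: rest := List.mem_cons_self
    have hT : PySem.Set.ofList [s0] = [s0] := rfl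
    have hchar := bfs_loop_char (s0 :: rest) s0 hs0L (2 * (s0 :: rest).length + 2)
      PySem.Set.empty (PySem.Set.ofList [s0])
      (fun x hx => by cases hx)
      (fun x hx => by rw [hT] at hx; rw [List.mem_singleton.mp hx]; exact hs0L)
      (fun x hx => by cases hx)
      (fun x hx => by rw [hT] at hx; rw [List.mem_singleton.mp hx]; exact Relation.ReflTransGen.refl)
      (fun c hc => by cases hc)
      (by rw [hT]; exact Or.inr List.mem_cons_self)
      (by
        unfold bfsMu
        rw [hT, show (PySem.Set.empty : PySem.Set (Int × Int)) = ([] : List (Int × Int)) from rfl]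
        have hflag : ¬ ([s0] : List (Int × Int)).toFinset ⊆ ([] : List (Int × Int)).toFinset := by
          intro hsub
          have : s0 ∈ ([] : List (Int × Int)).toFinset :=
            hsub (List.mem_toFinset.mpr List.mem_cons_self)
          simp at this
        rw [if_neg hflag]
        have hcard : ((s0 :: rest).toFinset \ ([] : List (Int × Int)).toFinset).card
            ≤ (s0 :: rest).length := by
          calc ((s0 :: rest).toFinset \ ([] : List (Int × Int)).toFinset).card
              ≤ (s0 :: rest).toFinset.card := Finset.card_le_card (Finset.sdiff_subset)
            _ ≤ (s0 :: rest).length := List.toFinset_card_le _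
        omega)
    set chained := bfs_loop (s0 :: rest) PySem.Set.empty (PySem.Set.ofList [s0])
      (2 * (s0 :: rest).length + 2) with hch
    have hdiff : (PySem.Set.len (PySem.Set.diff (s0 :: rest) chained) == 0) = true
        ↔ ∀ x ∈ s0 :: rest, x ∈ chained := by
      have hlen : PySem.Set.len (PySem.Set.diff (s0 :: rest) chained)
          = ((PySem.Set.diff (s0 :: rest) chained).length : Int) := rfl
      rw [beq_iff_eq, hlen]
      constructor
      · intro hz x hx
        have hnil : PySem.Set.diff (s0 :: rest) chained = [] :=
          List.length_eq_zero_iff.mp (by exact_mod_cast hz)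
        by_contra hxc
        have : x ∈ PySem.Set.diff (s0 :: rest) chained :=
          (PySem.Set.mem_diff (s0 :: rest) chained x).mpr ⟨hx, hxc⟩
        rw [hnil] at this
        cases this
      · intro hall
        have hnil : PySem.Set.diff (s0 :: rest) chained = [] := by
          rw [List.eq_nil_iff_forall_not_mem]
          intro x hx
          obtain ⟨h1, h2⟩ := (PySem.Set.mem_diff (s0 :: rest) chained x).mp hx
          exact h2 (hall x h1)
        rw [hnil]
        rfl
    rw [hdiff]
    have hstep : (∀ x ∈ s0 :: rest, x ∈ chained) ↔ ∀ x ∈ s0 :: rest, Reach (s0 :: rest) s0 x := by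
      constructor
      · intro hall x hx
        exact ((hchar x).mp (hall x hx)).2
      · intro hall x hx
        exact (hchar x).mpr ⟨hx, hall x hx⟩
    rw [hstep]
    exact pairwise_iff_from_base (s0 :: rest) s0 hs0L

-- ---------- B side: quick-find characterization ----------

-- edges of the processing double loop, flattened
def edges (L : List (Int × Int)) : List ((Int × Int) × (Int × Int)) :=
  L.flatMap (fun p => (nbrs p).map (fun nb => (p, nb)))

lemma mem_edges (L : List (Int × Int)) (u v : Int × Int) :
    (u, v) ∈ edges L ↔ u ∈ L ∧ v ∈ nbrs u := by
  simp [edges, List.mem_flatMap, List.mem_map, Prod.ext_iff]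

-- reachability using only the processed prefix of edges
def PRel (L : List (Int × Int)) (pre : List ((Int × Int) × (Int × Int))) (u v : Int × Int) : Prop :=
  ((u, v) ∈ pre ∨ (v, u) ∈ pre) ∧ u ∈ L ∧ v ∈ L

def PReach (L : List (Int × Int)) (pre : List ((Int × Int) × (Int × Int))) :
    (Int × Int) → (Int × Int) → Prop :=
  Relation.ReflTransGen (PRel L pre)

lemma pReach_symm (L : List (Int × Int)) (pre : List ((Int × Int) × (Int × Int)))
    {u v : Int × Int} (h : PReach L pre u v) : PReach L pre v u := by
  refine Relation.ReflTransGen.symmetric ?_ h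
  rintro a b ⟨hab, ha, hb⟩
  exact ⟨hab.symm, hb, ha⟩

lemma pReach_mono (L : List (Int × Int)) {pre pre' : List ((Int × Int) × (Int × Int))}
    (hsub : ∀ e ∈ pre, e ∈ pre') {u v : Int × Int} (h : PReach L pre u v) : PReach L pre' u v := by
  refine Relation.ReflTransGen.mono ?_ h
  rintro a b ⟨hab, ha, hb⟩
  exact ⟨hab.imp (hsub _) (hsub _), ha, hb⟩

lemma pReach_edges_iff_reach (L : List (Int × Int)) (u v : Int × Int) :
    PReach L (edges L) u v ↔ Reach L u v := by
  constructor
  · refine Relation.ReflTransGen.mono ?_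
    rintro u v ⟨huv | hvu, hu, hv⟩
    · exact ⟨hu, hv, ((mem_edges L u v).mp huv).2⟩
    · exact ⟨hu, hv, (nbrs_symm u v).mpr ((mem_edges L v u).mp hvu).2⟩
  · refine Relation.ReflTransGen.mono ?_
    rintro u v ⟨hu, hv, hn⟩
    exact ⟨Or.inl ((mem_edges L u v).mpr ⟨hu, hn⟩), hu, hv⟩

-- the invariant of B's processing loop
def UFInv (L : List (Int × Int)) (pre : List ((Int × Int) × (Int × Int)))
    (d : PySem.Dict (Int × Int) (Int × Int)) : Prop :=
  d.keys = L ∧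
  (∀ k ∈ L, ∃ v, d.get? k = some v ∧ v ∈ L ∧ PReach L pre k v) ∧
  (∀ u v : Int × Int, (u, v) ∈ pre → u ∈ L → v ∈ L → d.get? u = d.get? v)

lemma relabel_fold_get? (a b : Int × Int) :
    ∀ (ks : List (Int × Int)), ks.Nodup →
      ∀ (d : PySem.Dict (Int × Int) (Int × Int)) (j : Int × Int),
        (ks.foldl (fun d k => if d.get? k = some a then d.insert k b else d) d).get? j
          = if j ∈ ks ∧ d.get? j = some a then some b else d.get? j := by
  intro ks
  induction ks with
  | nil => intro _ d j; simp
  | cons k ks ih =>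
    intro hnd d j
    obtain ⟨hk, hnd'⟩ := List.nodup_cons.mp hnd
    simp only [List.foldl_cons]
    rw [ih hnd']
    by_cases hjk : j = k
    · subst hjk
      by_cases hdk : d.get? j = some a
      · rw [if_pos hdk]
        have h1 : (d.insert j b).get? j = some b := PySem.Dict.get?_insert_self d j b
        have h2 : ¬ (j ∈ ks ∧ (d.insert j b).get? j = some a) := fun h => hk h.1
        have h3 : j ∈ j :: ks ∧ d.get? j = some a := ⟨List.mem_cons_self, hdk⟩
        rw [if_neg h2, if_pos h3, h1]
      · rw [if_neg hdk]
        have h2 : ¬ (j ∈ ks ∧ d.get? j = some a) := fun h => hdk h.2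
        have h3 : ¬ (j ∈ j :: ks ∧ d.get? j = some a) := fun h => hdk h.2
        rw [if_neg h2, if_neg h3]
    · have hstep : (if d.get? k = some a then d.insert k b else d).get? j = d.get? j := by
        split_ifs with h
        · exact PySem.Dict.get?_insert_of_ne d b hjk
        · rfl
      rw [hstep]
      by_cases hjks : j ∈ ks ∧ d.get? j = some a
      · have h3 : j ∈ k :: ks ∧ d.get? j = some a := ⟨List.mem_cons_of_mem _ hjks.1, hjks.2⟩
        rw [if_pos hjks, if_pos h3]
      · have h3 : ¬ (j ∈ k :: ks ∧ d.get? j = some a) :=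
          fun h => hjks ⟨(List.mem_cons.mp h.1).resolve_left hjk, h.2⟩
        rw [if_neg hjks, if_neg h3]

lemma fold_relabel_keys (a b : Int × Int) :
    ∀ (ks : List (Int × Int)) (d : PySem.Dict (Int × Int) (Int × Int)),
      (∀ k ∈ ks, k ∈ d.keys) →
      (ks.foldl (fun d k => if d.get? k = some a then d.insert k b else d) d).keys = d.keys := by
  intro ks
  induction ks with
  | nil => intro d _; simp
  | cons k ks ih =>
    intro d hks
    simp only [List.foldl_cons]
    have hkeys : (if d.get? k = some a then d.insert k b else d).keys = d.keys := by
      split_ifs with h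
      · exact PySem.Dict.keys_insert_of_contains d b
          ((PySem.Dict.contains_iff_mem_keys d k).mpr (hks k List.mem_cons_self))
      · rfl
    rw [ih _ (fun k' hk' => hkeys ▸ hks k' (List.mem_cons_of_mem _ hk')), hkeys]

lemma relabel_get? (d : PySem.Dict (Int × Int) (Int × Int)) (a b : Int × Int)
    (hnd : d.keys.Nodup) (j : Int × Int) :
    (relabel d a b).get? j = if d.get? j = some a then some b else d.get? j := by
  unfold relabel
  rw [relabel_fold_get? a b d.keys hnd d j]
  by_cases hj : d.get? j = some a
  · have hjk : j ∈ d.keys := by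
      by_contra hn
      rw [(PySem.Dict.get?_eq_none_iff_not_mem_keys d j).mpr hn] at hj
      cases hj
    rw [if_pos ⟨hjk, hj⟩, if_pos hj]
  · rw [if_neg (fun h => hj h.2), if_neg hj]

lemma relabel_keys (d : PySem.Dict (Int × Int) (Int × Int)) (a b : Int × Int) :
    (relabel d a b).keys = d.keys := by
  exact fold_relabel_keys a b d.keys d (fun k hk => hk)

lemma unionAt_inv (L : List (Int × Int)) (hnd : L.Nodup)
    (pre : List ((Int × Int) × (Int × Int))) (d : PySem.Dict (Int × Int) (Int × Int))
    (p nb : Int × Int) (hp : p ∈ L) (hInv : UFInv L pre d) :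
    UFInv L (pre ++ [(p, nb)]) (unionAt d p nb) := by
  obtain ⟨hkeys, hval, hpairs⟩ := hInv
  have hndk : d.keys.Nodup := hkeys ▸ hnd
  have hmono : ∀ {u v : Int × Int}, PReach L pre u v → PReach L (pre ++ [(p, nb)]) u v :=
    fun h => pReach_mono L (fun e he => List.mem_append_left _ he) h
  unfold unionAt
  cases hnb : d.get? nb with
  | none =>
    have hnbL : nb ∉ L := by
      rw [← hkeys]
      exact (PySem.Dict.get?_eq_none_iff_not_mem_keys d nb).mp hnb
    refine ⟨hkeys, ?_, ?_⟩
    · intro k hk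
      obtain ⟨v, h1, h2, h3⟩ := hval k hk
      exact ⟨v, h1, h2, hmono h3⟩
    · intro u v huv huL hvL
      rcases List.mem_append.mp huv with h | h
      · exact hpairs u v h huL hvL
      · have h' := List.mem_singleton.mp h
        have hv : v = nb := congrArg Prod.snd h'
        rw [hv] at hvL
        exact absurd hvL hnbL
  | some b0 =>
    have hnbL : nb ∈ L := by
      rw [← hkeys]
      by_contra hn
      rw [(PySem.Dict.get?_eq_none_iff_not_mem_keys d nb).mpr hn] at hnb
      cases hnb
    cases hp' : d.get? p with
    | none =>
      exfalso
      rw [PySem.Dict.get?_eq_none_iff_not_mem_keys, hkeys] at hp'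
      exact hp' hp
    | some a0 =>
      obtain ⟨vp, hvp, hvpL, hvpR⟩ := hval p hp
      obtain ⟨vnb, hvnb, hvnbL, hvnbR⟩ := hval nb hnbL
      have hvpa : vp = a0 := Option.some.inj (hvp.symm.trans hp')
      have hvnbb : vnb = b0 := Option.some.inj (hvnb.symm.trans hnb)
      subst hvpa; subst hvnbb
      show UFInv L (pre ++ [(p, nb)]) (if vp ≠ vnb then relabel d vp vnb else d)
      by_cases hab : vp = vnb
      · rw [if_neg (fun h => h hab)]
        refine ⟨hkeys, ?_, ?_⟩
        · intro k hk
          obtain ⟨v, h1, h2, h3⟩ := hval k hk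
          exact ⟨v, h1, h2, hmono h3⟩
        · intro u v huv huL hvL
          rcases List.mem_append.mp huv with h | h
          · exact hpairs u v h huL hvL
          · have h' := List.mem_singleton.mp h
            have hu : u = p := congrArg Prod.fst h'
            have hv : v = nb := congrArg Prod.snd h'
            rw [hu, hv, hp', hnb, hab]
      · rw [if_pos hab]
        have hrel := relabel_get? d vp vnb hndk
        have hedge : PReach L (pre ++ [(p, nb)]) p nb :=
          Relation.ReflTransGen.single
            ⟨Or.inl (List.mem_append_right _ List.mem_cons_self), hp, hnbL⟩
        have hchain : ∀ k, PReach L pre k vp → PReach L (pre ++ [(p, nb)]) k vnb := by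
          intro k hk
          exact ((hmono hk).trans ((pReach_symm L _ (hmono hvpR)).trans
            (hedge.trans (hmono hvnbR))))
        refine ⟨by rw [relabel_keys]; exact hkeys, ?_, ?_⟩
        · intro k hk
          obtain ⟨v, h1, h2, h3⟩ := hval k hk
          by_cases hva : v = vp
          · subst hva
            refine ⟨vnb, ?_, hvnbL, hchain k h3⟩
            rw [hrel k, if_pos h1]
          · refine ⟨v, ?_, h2, hmono h3⟩
            rw [hrel k]
            have : ¬ d.get? k = some vp := by
              rw [h1]
              intro hc
              exact hva (Option.some.inj hc)
            rw [if_neg this]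
            exact h1
        · intro u v huv huL hvL
          rcases List.mem_append.mp huv with h | h
          · have heq := hpairs u v h huL hvL
            rw [hrel u, hrel v, heq]
          · have h' := List.mem_singleton.mp h
            have hu : u = p := congrArg Prod.fst h'
            have hv : v = nb := congrArg Prod.snd h'
            rw [hu, hv, hrel p, hrel nb, hp', hnb, if_pos rfl]
            have : ¬ (some vnb = some vp) := fun hc => hab (Option.some.inj hc).symm
            rw [if_neg this]

lemma fold_edges_inv (L : List (Int × Int)) (hnd : L.Nodup) :
    ∀ (es : List ((Int × Int) × (Int × Int))) (pre : List ((Int × Int) × (Int × Int)))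
      (d : PySem.Dict (Int × Int) (Int × Int)),
      (∀ e ∈ es, e.1 ∈ L) → UFInv L pre d →
      UFInv L (pre ++ es) (es.foldl (fun d e => unionAt d e.1 e.2) d) := by
  intro es
  induction es with
  | nil =>
    intro pre d _ h
    simpa using h
  | cons e es ih =>
    intro pre d hes hinv
    simp only [List.foldl_cons]
    have h1 := unionAt_inv L hnd pre d e.1 e.2 (hes e List.mem_cons_self) hinv
    have h2 := ih (pre ++ [(e.1, e.2)]) _
      (fun e' he' => hes e' (List.mem_cons_of_mem _ he')) h1
    rw [List.append_assoc] at h2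
    exact h2

lemma comp0_get? (positions : List (Int × Int)) (k : Int × Int) :
    (positions.foldl (fun d p => d.insert p p) PySem.Dict.empty).get? k
      = if k ∈ positions then some k else none := by
  have hgen : ∀ (l : List (Int × Int)) (d : PySem.Dict (Int × Int) (Int × Int)),
      (l.foldl (fun d p => d.insert p p) d).get? k = if k ∈ l then some k else d.get? k := by
    intro l
    induction l with
    | nil => intro d; simp
    | cons p l ih =>
      intro d
      simp only [List.foldl_cons]
      rw [ih]
      by_cases hkl : k ∈ l
      · rw [if_pos hkl, if_pos (List.mem_cons_of_mem _ hkl)]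
      · rw [if_neg hkl]
        by_cases hkp : k = p
        · subst hkp
          rw [PySem.Dict.get?_insert_self, if_pos List.mem_cons_self]
        · rw [PySem.Dict.get?_insert_of_ne d p hkp,
            if_neg (fun h => hkp ((List.mem_cons.mp h).resolve_right hkl))]
  rw [hgen]
  split_ifs
  · rfl
  · exact PySem.Dict.get?_empty k

lemma comp0_keys (positions : List (Int × Int)) :
    (positions.foldl (fun d p => d.insert p p) PySem.Dict.empty).keys
      = PySem.Set.ofList positions := by
  have h := PySem.Dict.keys_foldl_insert positions (fun _ x => x)
    (PySem.Dict.empty : PySem.Dict (Int × Int) (Int × Int))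
  simp only [PySem.Dict.keys_empty] at h
  rw [PySem.Set.update_nil_left] at h
  exact h

lemma ofList_len_le_one_iff (xs : List (Int × Int)) :
    PySem.Set.len (PySem.Set.ofList xs) ≤ 1 ↔ ∀ x ∈ xs, ∀ y ∈ xs, x = y := by
  have hlen : PySem.Set.len (PySem.Set.ofList xs) = ((PySem.Set.ofList xs).length : Int) := rfl
  constructor
  · intro h x hx y hy
    have hx' := (PySem.Set.mem_ofList xs x).mpr hx
    have hy' := (PySem.Set.mem_ofList xs y).mpr hy
    have hl : (PySem.Set.ofList xs).length ≤ 1 := by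
      rw [hlen] at h; exact_mod_cast h
    cases h' : PySem.Set.ofList xs with
    | nil => rw [h'] at hx'; cases hx'
    | cons a t =>
      rw [h'] at hl hx' hy'
      cases t with
      | nil =>
        simp only [List.mem_singleton] at hx' hy'
        rw [hx', hy']
      | cons b t' => simp at hl
  · intro h
    rw [hlen]
    cases h' : PySem.Set.ofList xs with
    | nil => simp
    | cons a t =>
      cases t with
      | nil => simp
      | cons b t' =>
        exfalso
        have ha : a ∈ PySem.Set.ofList xs := h' ▸ List.mem_cons_self
        have hb : b ∈ PySem.Set.ofList xs := h' ▸ List.mem_cons_of_mem _ List.mem_cons_self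
        have hnd := PySem.Set.nodup_ofList xs
        rw [h'] at hnd
        have hab : a ≠ b := by
          intro hab
          exact (List.nodup_cons.mp hnd).1 (hab ▸ List.mem_cons_self)
        exact hab (h a ((PySem.Set.mem_ofList xs a).mp ha) b ((PySem.Set.mem_ofList xs b).mp hb))

lemma are_chained_alt_true_iff (positions : List (Int × Int)) :
    are_chained_alt positions = true ↔
      ∀ p ∈ PySem.Set.ofList positions, ∀ q ∈ PySem.Set.ofList positions,
        Reach (PySem.Set.ofList positions) p q := by
  have hnd : (PySem.Set.ofList positions).Nodup := PySem.Set.nodup_ofList positions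
  show decide (PySem.Set.len (PySem.Set.ofList
      ((((positions.foldl (fun d p => d.insert p p) PySem.Dict.empty).keys).foldl
        (fun d p => (nbrs p).foldl (fun d nb => unionAt d p nb) d)
        (positions.foldl (fun d p => d.insert p p) PySem.Dict.empty)).values)) ≤ 1) = true ↔ _
  have hkeys0 : (positions.foldl (fun d p => d.insert p p) PySem.Dict.empty).keys
      = PySem.Set.ofList positions := comp0_keys positions
  have hinv0 : UFInv (PySem.Set.ofList positions) []
      (positions.foldl (fun d p => d.insert p p) PySem.Dict.empty) := by
    refine ⟨hkeys0, ?_, ?_⟩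
    · intro k hk
      refine ⟨k, ?_, hk, Relation.ReflTransGen.refl⟩
      rw [comp0_get? positions k, if_pos ((PySem.Set.mem_ofList positions k).mp hk)]
    · intro u v h
      cases h
  have hfold : ((positions.foldl (fun d p => d.insert p p) PySem.Dict.empty).keys).foldl
        (fun d p => (nbrs p).foldl (fun d nb => unionAt d p nb) d)
        (positions.foldl (fun d p => d.insert p p) PySem.Dict.empty)
      = (edges (PySem.Set.ofList positions)).foldl (fun d e => unionAt d e.1 e.2)
        (positions.foldl (fun d p => d.insert p p) PySem.Dict.empty) := by
    rw [hkeys0]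
    unfold edges
    rw [List.foldl_flatMap]
    simp only [List.foldl_map]
  rw [hfold]
  have hinv := fold_edges_inv (PySem.Set.ofList positions) hnd
    (edges (PySem.Set.ofList positions)) []
    (positions.foldl (fun d p => d.insert p p) PySem.Dict.empty)
    (fun e he =>
      ((mem_edges (PySem.Set.ofList positions) e.1 e.2).mp he).1)
    hinv0
  simp only [List.nil_append] at hinv
  set comp := (edges (PySem.Set.ofList positions)).foldl (fun d e => unionAt d e.1 e.2)
    (positions.foldl (fun d p => d.insert p p) PySem.Dict.empty) with hcomp
  obtain ⟨hkeys, hval, hpairs⟩ := hinv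
  rw [decide_eq_true_eq, ofList_len_le_one_iff]
  have hvals : comp.values = comp.keys.map (fun k => comp.getD k ((0 : Int), (0 : Int))) :=
    PySem.Dict.values_eq_map_keys comp (by rw [hkeys]; exact hnd) _
  rw [hvals, hkeys]
  have hget_of_reach : ∀ u v : Int × Int,
      PReach (PySem.Set.ofList positions) (edges (PySem.Set.ofList positions)) u v →
      comp.get? u = comp.get? v := by
    intro u v hr
    induction hr with
    | refl => rfl
    | tail _ e ih =>
      obtain ⟨he, hbL, hcL⟩ := e
      rcases he with he | he
      · rw [ih, hpairs _ _ he hbL hcL]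
      · rw [ih, (hpairs _ _ he hcL hbL).symm]
  constructor
  · intro h p hp q hq
    obtain ⟨vp, hvp, hvpL, hvpR⟩ := hval p hp
    obtain ⟨vq, hvq, hvqL, hvqR⟩ := hval q hq
    have heq : comp.getD p ((0 : Int), (0 : Int)) = comp.getD q ((0 : Int), (0 : Int)) :=
      h _ (List.mem_map_of_mem hp) _ (List.mem_map_of_mem hq)
    rw [PySem.Dict.getD_eq_get?_getD, PySem.Dict.getD_eq_get?_getD, hvp, hvq] at heq
    simp only [Option.getD_some] at heq
    subst heq
    exact (pReach_edges_iff_reach (PySem.Set.ofList positions) p q).mp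
      (hvpR.trans (pReach_symm _ _ hvqR))
  · intro h x hx y hy
    obtain ⟨p, hp, rfl⟩ := List.mem_map.mp hx
    obtain ⟨q, hq, rfl⟩ := List.mem_map.mp hy
    have hreach := (pReach_edges_iff_reach (PySem.Set.ofList positions) p q).mpr (h p hp q hq)
    rw [PySem.Dict.getD_eq_get?_getD, PySem.Dict.getD_eq_get?_getD, hget_of_reach p q hreach]

-- ===== VERDICT (by name: the statement is the Claim_ definition above) =====
theorem are_chained_spec : Claim_equal_are_chained := by
  intro positions _
  unfold Spec_are_chained
  exact Bool.coe_iff_coe.mp ((are_chained_true_iff positions).trans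
    (are_chained_alt_true_iff positions).symm)
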